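-- pv_equiv track=rewrite | github.com/rvnminers-A-and-N/satorip2p | src/satorip2p/protocol/referral.py | get_tier_for_count
-- ===== SOURCE A (Python) =====
-- REFERRAL_TIERS = {
--     'bronze': {'count': 5, 'bonus': 0.02},       # +2%
--     'silver': {'count': 25, 'bonus': 0.05},      # +5%
--     'gold': {'count': 100, 'bonus': 0.08},       # +8%
--     'platinum': {'count': 500, 'bonus': 0.12},   # +12%
--     'diamond': {'count': 2000, 'bonus': 0.15},   # +15%
-- }
--
-- REFERRAL_TIER_ORDER = ['none', 'bronze', 'silver', 'gold', 'platinum', 'diamond']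
--
-- def get_tier_for_count(count: int) -> str:
--     """Get tier name for a referral count."""
--     tier = 'none'
--     for tier_name in REFERRAL_TIER_ORDER[1:]:  # Skip 'none'
--         if count >= REFERRAL_TIERS[tier_name]['count']:
--             tier = tier_name
--         else:
--             break
--     return tier
-- ===== SOURCE B (Python) =====
-- REFERRAL_TIERS = {
--     'bronze': {'count': 5, 'bonus': 0.02},
--     'silver': {'count': 25, 'bonus': 0.05},
--     'gold': {'count': 100, 'bonus': 0.08},
--     'platinum': {'count': 500, 'bonus': 0.12},
--     'diamond': {'count': 2000, 'bonus': 0.15},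
-- }
--
-- REFERRAL_TIER_ORDER = ['none', 'bronze', 'silver', 'gold', 'platinum', 'diamond']
--
-- def get_tier_for_count(count: int) -> str:
--     """Get tier name for a referral count."""
--     idx = sum(1 for name in REFERRAL_TIER_ORDER[1:]
--               if count >= REFERRAL_TIERS[name]['count'])
--     return REFERRAL_TIER_ORDER[idx]
-- ===== Notes on version B (the rewrite author's own statement) =====
-- stated objective: simpler
-- what changed: Replaces the scan-with-accumulator-and-break by counting how many (strictly increasing) thresholds are satisfied and indexing the tier-order list with that count.
import Mathlib
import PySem

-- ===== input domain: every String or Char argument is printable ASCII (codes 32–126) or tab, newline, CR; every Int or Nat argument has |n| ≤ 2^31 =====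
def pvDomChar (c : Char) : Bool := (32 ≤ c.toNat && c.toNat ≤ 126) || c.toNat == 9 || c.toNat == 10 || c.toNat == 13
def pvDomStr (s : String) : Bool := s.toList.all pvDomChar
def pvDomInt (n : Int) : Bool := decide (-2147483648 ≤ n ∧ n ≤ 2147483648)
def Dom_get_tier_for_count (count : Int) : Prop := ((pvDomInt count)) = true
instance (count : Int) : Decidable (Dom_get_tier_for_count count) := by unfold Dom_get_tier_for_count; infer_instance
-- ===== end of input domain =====

-- B replaces A's scan-with-break and running `tier` variable by counting the satisfied
-- thresholds and indexing the tier-order list; return value only, no side effects.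

-- Only the 'count' field of REFERRAL_TIERS is used by the function; the unused float
-- 'bonus' fields are not ported.
def referralTierCount : String → Int
  | "bronze" => 5
  | "silver" => 25
  | "gold" => 100
  | "platinum" => 500
  | "diamond" => 2000
  | _ => 0

def REFERRAL_TIER_ORDER : List String :=
  ["none", "bronze", "silver", "gold", "platinum", "diamond"]

-- ===== PORT A =====
-- the for-loop with break, carrying the running `tier` accumulator
def tierLoopA (count : Int) : List String → String → String
  | [], tier => tier
  | name :: rest, tier =>
      if count ≥ referralTierCount name then tierLoopA count rest name
      else tier

def get_tier_for_count (count : Int) : String :=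
  tierLoopA count (PySem.List.slice REFERRAL_TIER_ORDER (some 1) none) "none"

-- ===== PORT B =====
-- idx = number of satisfied thresholds; REFERRAL_TIER_ORDER[idx] (always in range: idx ≤ 5)
def get_tier_for_count_alt (count : Int) : String :=
  let idx : Int :=
    ((PySem.List.slice REFERRAL_TIER_ORDER (some 1) none).filter
      (fun name => count ≥ referralTierCount name)).length
  (PySem.List.pyGet? REFERRAL_TIER_ORDER idx).getD ""

-- ===== PRECONDITION & SPEC =====
def Spec_get_tier_for_count (count : Int) (out : String) : Prop := out = get_tier_for_count_alt count
instance (count : Int) (out : String) : Decidable (Spec_get_tier_for_count count out) := by unfold Spec_get_tier_for_count; infer_instance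

-- ===== CLAIM (what is proved, stated in full; the proofs are below) =====
def Claim_equal_get_tier_for_count : Prop := ∀ (count : Int), Dom_get_tier_for_count count → Spec_get_tier_for_count count (get_tier_for_count count)

-- ===== LEMMAS AND PROOFS =====

-- ===== VERDICT (by name: the statement is the Claim_ definition above) =====
theorem sliceOrder_eq :
    PySem.List.slice REFERRAL_TIER_ORDER (some 1) none
      = ["bronze", "silver", "gold", "platinum", "diamond"] := by
  rw [PySem.List.slice_from_one]; rfl

theorem get_tier_for_count_spec : Claim_equal_get_tier_for_count := by
  intro count _
  unfold Spec_get_tier_for_count get_tier_for_count get_tier_for_count_alt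
  rw [sliceOrder_eq]
  by_cases h5 : (5:Int) ≤ count <;> by_cases h25 : (25:Int) ≤ count <;>
    by_cases h100 : (100:Int) ≤ count <;> by_cases h500 : (500:Int) ≤ count <;>
    by_cases h2000 : (2000:Int) ≤ count <;>
    first
      | omega
      | simp [tierLoopA, referralTierCount, List.filter, REFERRAL_TIER_ORDER,
          h5, h25, h100, h500, h2000]
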